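-- pv_equiv track=rewrite | github.com/DerekRoberts/uvic | seng265-c-python-swDevMethods/a02/codeAct_1.01/bin/generate_python.py | gen_assert
-- ===== SOURCE A (Python) =====
-- def gen_assert(targets):
-- 	count = 0
-- 	s = 'def ca_assert(n,expr):\n\tif not expr:\n'
-- 	# if certain target is hit, increase the corresponding flag
-- 	for i in range(len(targets)):
-- 		if targets[i] != '':
-- 			s += '\t\tglobal ca_assert_'+str(count)+'\n'
-- 			s += '\t\tif n == '+str(count)+':\n'+\
-- 			 '\t\t\tca_assert_'+str(count)+' += 1\n'
-- 			count += 1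
-- 	return s
-- ===== SOURCE B (Python) =====
-- def gen_assert(targets):
-- 	count = sum(1 for t in targets if t != '')
-- 	body = ''.join(
-- 		'\t\tglobal ca_assert_' + str(i) + '\n'
-- 		'\t\tif n == ' + str(i) + ':\n'
-- 		'\t\t\tca_assert_' + str(i) + ' += 1\n'
-- 		for i in range(count))
-- 	return 'def ca_assert(n,expr):\n\tif not expr:\n' + body
-- ===== Notes on version B (the rewrite author's own statement) =====
-- stated objective: alternative
-- what changed: B first counts the non-empty targets in one pass, then emits the body by iterating over range(count) and joining templated blocks, instead of A's single index loop over targets that appends with += while threading a running counter.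
import Mathlib
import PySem

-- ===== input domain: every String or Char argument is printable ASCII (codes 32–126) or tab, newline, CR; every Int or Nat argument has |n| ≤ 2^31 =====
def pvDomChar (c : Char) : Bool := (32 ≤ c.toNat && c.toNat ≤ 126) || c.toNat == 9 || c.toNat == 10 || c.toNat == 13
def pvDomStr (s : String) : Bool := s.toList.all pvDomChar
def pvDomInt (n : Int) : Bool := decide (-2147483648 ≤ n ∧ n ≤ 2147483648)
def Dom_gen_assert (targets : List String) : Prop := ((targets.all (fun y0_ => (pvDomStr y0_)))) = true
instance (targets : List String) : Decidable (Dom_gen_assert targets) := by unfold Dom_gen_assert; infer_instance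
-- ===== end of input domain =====

-- B replaces A's counter-threading += loop over targets by count-then-emit: one pass counts non-empty targets, then the body is joined over range(count) (objective: alternative decomposition, same cost).
-- ===== PORT A =====
-- literal port of A: index loop over range(len(targets)) threading (count, s);
-- the two '+=' statements are the two appends below.
-- targets[i] is always in range here, so pyGetD with default "" is exact.
def gen_assert (targets : List String) : String :=
  (((PySem.List.pyRange 0 (targets.length : Int) 1).foldl
    (fun (st : Int × String) i =>
      if PySem.List.pyGetD targets i "" ≠ "" then
        (st.1 + 1,
          (st.2 ++ ("\t\tglobal ca_assert_" ++ PySem.Int.toStr st.1 ++ "\n"))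
            ++ ("\t\tif n == " ++ PySem.Int.toStr st.1 ++ ":\n"
                 ++ "\t\t\tca_assert_" ++ PySem.Int.toStr st.1 ++ " += 1\n"))
      else st)
    (0, "def ca_assert(n,expr):\n\tif not expr:\n"))).2

-- ===== PORT B =====
-- B's block template for counter value i (the generator expression's element)
def pvBlock (c : Int) : String :=
  "\t\tglobal ca_assert_" ++ PySem.Int.toStr c ++ "\n" ++
  "\t\tif n == " ++ PySem.Int.toStr c ++ ":\n" ++
  "\t\t\tca_assert_" ++ PySem.Int.toStr c ++ " += 1\n"

def gen_assert_alt (targets : List String) : String :=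
  let count : Int := ((targets.filter (fun t => t ≠ "")).length : Int)
  "def ca_assert(n,expr):\n\tif not expr:\n" ++
    PySem.Str.join "" ((PySem.List.pyRange 0 count 1).map pvBlock)

-- ===== PRECONDITION & SPEC =====
def Spec_gen_assert (targets : List String) (out : String) : Prop := out = gen_assert_alt targets
instance (targets : List String) (out : String) : Decidable (Spec_gen_assert targets out) := by unfold Spec_gen_assert; infer_instance

-- ===== CLAIM (what is proved, stated in full; the proofs are below) =====
def Claim_equal_gen_assert : Prop := ∀ (targets : List String), Dom_gen_assert targets → Spec_gen_assert targets (gen_assert targets)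


-- ===== LEMMAS AND PROOFS =====
theorem pv_flatten_intersperse_nil (xs : List (List Char)) :
    (List.intersperse [] xs).flatten = xs.flatten := by
  induction xs with
  | nil => rfl
  | cons a t ih =>
    cases t with
    | nil => rfl
    | cons b u => simp_all [List.intersperse]

-- the counting loop over the filtered list emits the blocks c .. c+len-1 in order
theorem pv_fold_blocks (l : List String) (c : Int) (s : String) :
    ((l.foldl (fun (st : Int × String) (_ : String) =>
          (st.1 + 1,
            st.2 ++ ("\t\tglobal ca_assert_" ++ PySem.Int.toStr st.1 ++ "\n")
              ++ ("\t\tif n == " ++ PySem.Int.toStr st.1 ++ ":\n"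
                   ++ "\t\t\tca_assert_" ++ PySem.Int.toStr st.1 ++ " += 1\n"))) (c, s))).2.toList
      = s.toList ++ ((PySem.List.pyRange c (c + l.length) 1).map (fun i => (pvBlock i).toList)).flatten := by
  induction l generalizing c s with
  | nil => simp [PySem.List.pyRange_one_eq_nil (le_refl c)]
  | cons x t ih =>
    simp only [List.foldl_cons, ih]
    simp only [pvBlock]
    have h1 : c < c + ((x :: t).length : Int) := by simp only [List.length_cons]; push_cast; omega
    rw [PySem.List.pyRange_one_cons h1]
    have h2 : c + ((x :: t).length : Int) = (c + 1) + (t.length : Int) := by simp only [List.length_cons]; push_cast; ring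
    rw [h2]
    simp

-- ===== VERDICT (by name: the statement is the Claim_ definition above) =====
theorem gen_assert_spec : Claim_equal_gen_assert := by
  intro targets _
  unfold Spec_gen_assert gen_assert gen_assert_alt
  apply String.toList_injective
  rw [PySem.List.foldl_pyRange_zero_pyGetD' targets ""
        (fun (st : Int × String) t => if t ≠ "" then
          (st.1 + 1,
            (st.2 ++ ("\t\tglobal ca_assert_" ++ PySem.Int.toStr st.1 ++ "\n"))
              ++ ("\t\tif n == " ++ PySem.Int.toStr st.1 ++ ":\n"
                   ++ "\t\t\tca_assert_" ++ PySem.Int.toStr st.1 ++ " += 1\n"))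
          else st)
        (0, "def ca_assert(n,expr):\n\tif not expr:\n")]
  rw [PySem.List.foldl_ite_eq_foldl_filter]
  rw [pv_fold_blocks]
  simp [PySem.Chars.join, List.intercalate, pv_flatten_intersperse_nil, Function.comp_def]
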